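-- pv_equiv track=rewrite | github.com/dixitomkar1809/Coding-Python | GFG/Array/elementLeftRight.py | leftRight
-- ===== SOURCE A (Python) =====
-- def leftRight(arr):
--     leftMax = [float('-inf')] * len(arr)
--     rightMax = [float('inf')] * len(arr)
--     for i in range(1, len(arr)):
--         leftMax[i] = max(leftMax[i-1], arr[i-1])
--     for i in range(len(arr)-2, -1, -1):
--         rightMax[i] = min(rightMax[i+1], arr[i+1])
--     for i in range(1, len(arr)-1):
--         if leftMax[i] < arr[i] and arr[i] < rightMax[i]:
--             return arr[i]
--     return -1
-- ===== SOURCE B (Python) =====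
-- def leftRight(arr):
--     # One-pass candidate elimination: O(1) extra space, no suffix array.
--     n = len(arr)
--     if n < 3:
--         return -1
--     cand = None
--     leftMax = arr[0]
--     for i in range(1, n - 1):
--         if cand is None:
--             if arr[i] > leftMax:
--                 cand = arr[i]
--         elif arr[i] <= cand:
--             cand = None
--         leftMax = max(leftMax, arr[i])
--     if cand is not None and cand < arr[n - 1]:
--         return cand
--     return -1
-- ===== Notes on version B (the rewrite author's own statement) =====
-- stated objective: faster
-- what changed: A precomputes full prefix-max and suffix-min arrays in three separate passes; B is the classic single-pass candidate-elimination algorithm with O(1) extra space: it tentatively adopts the first element exceeding the running prefix max, discards the candidate whenever a later element is not larger, and finally checks the surviving candidate against the last element.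
import Mathlib
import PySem

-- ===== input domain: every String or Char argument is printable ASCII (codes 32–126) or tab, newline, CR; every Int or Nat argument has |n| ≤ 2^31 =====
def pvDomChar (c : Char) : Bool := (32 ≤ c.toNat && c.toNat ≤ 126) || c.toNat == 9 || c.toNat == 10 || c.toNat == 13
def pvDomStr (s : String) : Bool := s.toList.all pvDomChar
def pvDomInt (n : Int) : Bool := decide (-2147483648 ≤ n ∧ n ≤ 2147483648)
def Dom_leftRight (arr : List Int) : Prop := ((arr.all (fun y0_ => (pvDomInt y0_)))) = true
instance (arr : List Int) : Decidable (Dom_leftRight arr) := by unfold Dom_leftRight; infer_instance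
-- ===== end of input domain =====

-- B replaces A's three-pass prefix-max/suffix-min array construction by a single-pass
-- candidate-elimination scan with O(1) extra space (measured faster by a constant factor).

-- ===== PORT A =====
-- float('-inf') / float('inf') sentinels are modelled as `none`; all returned values are ints.
-- max(-inf, b) = b and min(inf, b) = b:
def pvOmax (o : Option Int) (b : Int) : Option Int :=
  some (match o with | none => b | some a => max a b)
def pvOmin (o : Option Int) (b : Int) : Option Int :=
  some (match o with | none => b | some a => min a b)
-- leftMax[i] from A's first loop (same recurrence: leftMax[i] = max(leftMax[i-1], arr[i-1]));
-- all indices the port reads are provably in range, so arr[i] is List.getD.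
def lmA (arr : List Int) : Nat → Option Int
  | 0 => none
  | i + 1 => pvOmax (lmA arr i) (arr.getD i 0)
-- rightMax from A's second loop (rightMax[i] = min(rightMax[i+1], arr[i+1]), rightMax[n-1] = inf),
-- written by its distance d = n-1-i from the right end, the direction the loop runs:
def rmD (arr : List Int) : Nat → Option Int
  | 0 => none
  | d + 1 => pvOmin (rmD arr d) (arr.getD (arr.length - 1 - d) 0)
-- -inf < x; x < inf
def pvLtO (o : Option Int) (x : Int) : Bool := match o with | none => true | some a => decide (a < x)
def pvGtO (o : Option Int) (x : Int) : Bool := match o with | none => true | some b => decide (x < b)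
-- A's third loop, over the index list range(1, len(arr)-1): return on first hit, else -1
def scanA (arr : List Int) : List Nat → Int
  | [] => -1
  | i :: rest =>
    if pvLtO (lmA arr i) (arr.getD i 0) && pvGtO (rmD arr (arr.length - 1 - i)) (arr.getD i 0) then
      arr.getD i 0
    else scanA arr rest

def leftRight (arr : List Int) : Int := scanA arr (List.range' 1 (arr.length - 1 - 1))

-- ===== PORT B =====
-- Source B's loop over range(1, n-1), carrying the current candidate and the running prefix max:
def scanB (arr : List Int) : List Nat → Option Int → Int → Option Int
  | [], cand, _ => cand
  | i :: rest, cand, lm =>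
    let x := arr.getD i 0
    let cand' := match cand with
      | none => if lm < x then some x else none
      | some c => if x ≤ c then none else some c
    scanB arr rest cand' (max lm x)

def leftRight_alt (arr : List Int) : Int :=
  if arr.length < 3 then -1
  else
    match scanB arr (List.range' 1 (arr.length - 2)) none (arr.getD 0 0) with
    | some c => if c < arr.getD (arr.length - 1) 0 then c else -1
    | none => -1

-- ===== PRECONDITION & SPEC =====
def Spec_leftRight (arr : List Int) (out : Int) : Prop := out = leftRight_alt arr
instance (arr : List Int) (out : Int) : Decidable (Spec_leftRight arr out) := by unfold Spec_leftRight; infer_instance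

-- ===== CLAIM (what is proved, stated in full; the proofs are below) =====
def Claim_equal_leftRight : Prop := ∀ (arr : List Int), Dom_leftRight arr → Spec_leftRight arr (leftRight arr)

-- ===== LEMMAS AND PROOFS =====

-- the test A's third loop performs at index i
def Qual (arr : List Int) (i : Nat) : Bool :=
  pvLtO (lmA arr i) (arr.getD i 0) && pvGtO (rmD arr (arr.length - 1 - i)) (arr.getD i 0)

lemma scanA_cons (arr : List Int) (i : Nat) (rest : List Nat) :
    scanA arr (i :: rest) = if Qual arr i = true then arr.getD i 0 else scanA arr rest := by
  simp [scanA, Qual]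

lemma scanA_none (arr : List Int) : ∀ (l : List Nat),
    (∀ i ∈ l, Qual arr i = false) → scanA arr l = -1 := by
  intro l
  induction l with
  | nil => intro _; rfl
  | cons i rest ih =>
    intro h
    rw [scanA_cons, h i (by simp)]
    simp only [Bool.false_eq_true, if_false]
    exact ih (fun j hj => h j (by simp [hj]))

lemma scanA_first (arr : List Int) : ∀ (len s j : Nat), s ≤ j → j < s + len →
    Qual arr j = true → (∀ i, s ≤ i → i < j → Qual arr i = false) →
    scanA arr (List.range' s len) = arr.getD j 0 := by
  intro len
  induction len with
  | zero => intro s j h1 h2 _ _; omega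
  | succ len ih =>
    intro s j h1 h2 hq hfail
    rw [List.range'_succ, scanA_cons]
    by_cases hsj : s = j
    · subst hsj; rw [if_pos hq]
    · have hQs := hfail s (le_refl s) (by omega)
      rw [hQs]
      simp only [Bool.false_eq_true, if_false]
      exact ih (s + 1) j (by omega) (by omega) hq (fun i hi hij => hfail i (by omega) hij)

-- lm = lmA arr s dominates every earlier element
lemma lmA_ge (arr : List Int) : ∀ (s : Nat) (lm : Int) (j : Nat),
    lmA arr s = some lm → j < s → arr.getD j 0 ≤ lm := by
  intro s
  induction s with
  | zero => intro lm j h hj; omega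
  | succ s ih =>
    intro lm j h hj
    rw [lmA] at h
    cases hs : lmA arr s with
    | none =>
      rw [hs] at h
      simp only [pvOmax, Option.some.injEq] at h
      have hs0 : s = 0 := by
        cases s with
        | zero => rfl
        | succ t => rw [lmA] at hs; simp [pvOmax] at hs
      subst hs0
      have hj0 : j = 0 := by omega
      subst hj0
      exact le_of_eq h
    | some p =>
      rw [hs] at h
      simp only [pvOmax, Option.some.injEq] at h
      rcases Nat.lt_succ_iff_lt_or_eq.mp hj with h1 | h1
      · calc arr.getD j 0 ≤ p := ih p j hs h1
          _ ≤ max p (arr.getD s 0) := le_max_left _ _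
          _ = lm := h
      · subst h1
        rw [← h]
        exact le_max_right _ _

-- pvGtO (rmD arr d) v says v is below every one of the last d elements
lemma rmD_char (arr : List Int) : ∀ (d : Nat) (v : Int),
    pvGtO (rmD arr d) v = true ↔ ∀ t, t < d → v < arr.getD (arr.length - 1 - t) 0 := by
  intro d
  induction d with
  | zero => intro v; simp [rmD, pvGtO]
  | succ d ih =>
    intro v
    rw [rmD]
    cases hd : rmD arr d with
    | none =>
      have htriv : ∀ t, t < d → v < arr.getD (arr.length - 1 - t) 0 := (ih v).mp (by rw [hd]; rfl)
      simp only [pvOmin, pvGtO, decide_eq_true_eq]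
      constructor
      · intro h t ht
        rcases Nat.lt_succ_iff_lt_or_eq.mp ht with h1 | h1
        · exact htriv t h1
        · subst h1; exact h
      · intro h; exact h d (by omega)
    | some w =>
      have ihw : v < w ↔ ∀ t, t < d → v < arr.getD (arr.length - 1 - t) 0 := by
        rw [← ih v, hd]; simp [pvGtO]
      simp only [pvOmin, pvGtO, lt_min_iff, decide_eq_true_eq]
      constructor
      · intro h t ht
        rcases Nat.lt_succ_iff_lt_or_eq.mp ht with h1 | h1
        · exact (ihw.mp h.1) t h1
        · subst h1; exact h.2
      · intro h
        exact ⟨ihw.mpr (fun t ht => h t (by omega)), h d (by omega)⟩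

-- Qual i fails when some element strictly to i's right is ≤ arr[i]
lemma qual_false_of_wit (arr : List Int) (i t : Nat) (h : t < arr.length - 1 - i)
    (hge : arr.getD (arr.length - 1 - t) 0 ≤ arr.getD i 0) : Qual arr i = false := by
  have hfalse : pvGtO (rmD arr (arr.length - 1 - i)) (arr.getD i 0) = false := by
    rw [Bool.eq_false_iff]
    intro htrue
    have := (rmD_char arr _ _).mp htrue t h
    omega
  unfold Qual
  rw [hfalse, Bool.and_false]

-- Qual s fails when arr[s] does not exceed the prefix max
lemma qual_false_left (arr : List Int) (s : Nat) (lm : Int) (hlm : lmA arr s = some lm)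
    (h : arr.getD s 0 ≤ lm) : Qual arr s = false := by
  have hfalse : decide (lm < arr.getD s 0) = false := decide_eq_false (by omega)
  unfold Qual
  rw [hlm]
  simp only [pvLtO]
  rw [hfalse, Bool.false_and]

-- B's loop invariant at position s
def InvB (arr : List Int) (s : Nat) (cand : Option Int) : Prop :=
  match cand with
  | none => ∀ i, 1 ≤ i → i < s → Qual arr i = false
  | some c => ∃ j, 1 ≤ j ∧ j < s ∧ arr.getD j 0 = c ∧
      pvLtO (lmA arr j) c = true ∧
      (∀ k, j < k → k < s → c < arr.getD k 0) ∧
      (∀ i, 1 ≤ i → i < j → Qual arr i = false)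

def postB (arr : List Int) (o : Option Int) : Int :=
  match o with
  | some c => if c < arr.getD (arr.length - 1) 0 then c else -1
  | none => -1

lemma main_lemma (arr : List Int) : ∀ (m s : Nat) (cand : Option Int) (lm : Int),
    1 ≤ s → s + m = arr.length - 1 → 3 ≤ arr.length →
    lmA arr s = some lm → InvB arr s cand →
    scanA arr (List.range' 1 (arr.length - 2)) = postB arr (scanB arr (List.range' s m) cand lm) := by
  intro m
  induction m with
  | zero =>
    intro s cand lm hs hsm hn hlm hinv
    simp only [List.range'_zero, scanB]
    cases cand with
    | none =>
      rw [scanA_none arr _ (fun i hi => by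
        have hmem := List.mem_range'_1.mp hi
        exact hinv i hmem.1 (by omega))]
      rfl
    | some c =>
      obtain ⟨j, hj1, hjs, hjv, hLQ, hc3, hc4⟩ := hinv
      by_cases hlast : c < arr.getD (arr.length - 1) 0
      · -- the candidate survives: j is the first qualifying index
        have hQj : Qual arr j = true := by
          unfold Qual
          rw [hjv, hLQ, Bool.true_and, rmD_char]
          intro t ht
          cases t with
          | zero => simpa using hlast
          | succ t' => exact hc3 (arr.length - 1 - (t' + 1)) (by omega) (by omega)
        rw [scanA_first arr (arr.length - 2) 1 j hj1 (by omega) hQj (fun i hi hij => hc4 i hi hij),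
          hjv]
        show c = if c < arr.getD (arr.length - 1) 0 then c else -1
        rw [if_pos hlast]
      · -- the candidate fails the final check and nothing qualifies at all
        have hres : postB arr (some c) = -1 := by
          show (if c < arr.getD (arr.length - 1) 0 then c else -1) = -1
          rw [if_neg hlast]
        rw [hres]
        apply scanA_none
        intro i hi
        have hmem := List.mem_range'_1.mp hi
        rcases Nat.lt_trichotomy i j with h1 | h1 | h1
        · exact hc4 i hmem.1 h1
        · subst h1
          refine qual_false_of_wit arr i 0 (by omega) ?_
          rw [Nat.sub_zero, hjv]
          omega
        · have hci := hc3 i h1 (by omega)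
          refine qual_false_of_wit arr i 0 (by omega) ?_
          rw [Nat.sub_zero]
          omega
  | succ m ih =>
    intro s cand lm hs hsm hn hlm hinv
    rw [List.range'_succ]
    have hlm' : lmA arr (s + 1) = some (max lm (arr.getD s 0)) := by
      rw [lmA, hlm]; rfl
    cases cand with
    | none =>
      by_cases hx : lm < arr.getD s 0
      · show scanA arr (List.range' 1 (arr.length - 2)) =
          postB arr (scanB arr (List.range' (s + 1) m)
            (if lm < arr.getD s 0 then some (arr.getD s 0) else none) (max lm (arr.getD s 0)))
        rw [if_pos hx]
        refine ih (s + 1) (some (arr.getD s 0)) (max lm (arr.getD s 0)) (by omega) (by omega) hn hlm' ?_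
        exact ⟨s, hs, by omega, rfl, (by
            rw [hlm]
            show decide (lm < arr.getD s 0) = true
            exact decide_eq_true hx),
          (fun k h1 h2 => by omega), hinv⟩
      · show scanA arr (List.range' 1 (arr.length - 2)) =
          postB arr (scanB arr (List.range' (s + 1) m)
            (if lm < arr.getD s 0 then some (arr.getD s 0) else none) (max lm (arr.getD s 0)))
        rw [if_neg hx]
        refine ih (s + 1) none (max lm (arr.getD s 0)) (by omega) (by omega) hn hlm' ?_
        intro i h1 h2
        rcases Nat.lt_succ_iff_lt_or_eq.mp h2 with h3 | h3
        · exact hinv i h1 h3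
        · subst h3; exact qual_false_left arr i lm hlm (by omega)
    | some c =>
      obtain ⟨j, hj1, hjs, hjv, hLQ, hc3, hc4⟩ := hinv
      have hjle : arr.getD j 0 ≤ lm := lmA_ge arr s lm j hlm hjs
      by_cases hx : arr.getD s 0 ≤ c
      · show scanA arr (List.range' 1 (arr.length - 2)) =
          postB arr (scanB arr (List.range' (s + 1) m)
            (if arr.getD s 0 ≤ c then none else some c) (max lm (arr.getD s 0)))
        rw [if_pos hx]
        refine ih (s + 1) none (max lm (arr.getD s 0)) (by omega) (by omega) hn hlm' ?_
        intro i h1 h2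
        rcases Nat.lt_trichotomy i j with h3 | h3 | h3
        · exact hc4 i h1 h3
        · subst h3
          -- witness: element at index s (= n-1-t for t = n-1-s) is ≤ c = arr[i]
          refine qual_false_of_wit arr i (arr.length - 1 - s) (by omega) ?_
          rw [show arr.length - 1 - (arr.length - 1 - s) = s by omega, hjv]
          omega
        · rcases Nat.lt_succ_iff_lt_or_eq.mp h2 with h4 | h4
          · have hci := hc3 i h3 h4
            refine qual_false_of_wit arr i (arr.length - 1 - s) (by omega) ?_
            rw [show arr.length - 1 - (arr.length - 1 - s) = s by omega]
            omega
          · subst h4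
            exact qual_false_left arr i lm hlm (by omega)
      · show scanA arr (List.range' 1 (arr.length - 2)) =
          postB arr (scanB arr (List.range' (s + 1) m)
            (if arr.getD s 0 ≤ c then none else some c) (max lm (arr.getD s 0)))
        rw [if_neg hx]
        refine ih (s + 1) (some c) (max lm (arr.getD s 0)) (by omega) (by omega) hn hlm' ?_
        refine ⟨j, hj1, by omega, hjv, hLQ, ?_, hc4⟩
        intro k h1 h2
        rcases Nat.lt_succ_iff_lt_or_eq.mp h2 with h3 | h3
        · exact hc3 k h1 h3
        · subst h3; omega

-- ===== VERDICT (by name: the statement is the Claim_ definition above) =====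
theorem leftRight_spec : Claim_equal_leftRight := by
  unfold Claim_equal_leftRight
  intro arr _
  unfold Spec_leftRight leftRight leftRight_alt
  by_cases hn : arr.length < 3
  · have h0 : arr.length - 1 - 1 = 0 := by omega
    simp [hn, h0, scanA]
  · simp only [hn, if_false]
    have h2 : arr.length - 1 - 1 = arr.length - 2 := by omega
    rw [h2]
    exact main_lemma arr (arr.length - 2) 1 none (arr.getD 0 0) (by omega) (by omega) (by omega)
      (by simp [lmA, pvOmax]) (by intro i h1 h2; omega)
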